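-- pv_equiv track=rewrite | github.com/svtvrn/Movie-Reviewer | id3.py | check_threshold
-- ===== SOURCE A (Python) =====
-- def check_threshold(samples):
--     threshold = 1
--     neg = 0
--     pos = 0
--     for i in range(0, len(samples)):
--         if samples[i].get('clf'):
--             pos += 1
--         else:
--             neg += 1
--         if pos >= threshold*len(samples):
--             return True
--         elif neg >= threshold*len(samples):
--             return True
--     return False
-- ===== SOURCE B (Python) =====
-- def check_threshold(samples):
--     return len({bool(s.get('clf')) for s in samples}) == 1
-- ===== Notes on version B (the rewrite author's own statement) =====
-- stated objective: simpler
-- what changed: Replaced the two counters with threshold checks inside an index loop by a one-line set comprehension: collect the distinct truth values of the labels and test that exactly one remains.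
import Mathlib
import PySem

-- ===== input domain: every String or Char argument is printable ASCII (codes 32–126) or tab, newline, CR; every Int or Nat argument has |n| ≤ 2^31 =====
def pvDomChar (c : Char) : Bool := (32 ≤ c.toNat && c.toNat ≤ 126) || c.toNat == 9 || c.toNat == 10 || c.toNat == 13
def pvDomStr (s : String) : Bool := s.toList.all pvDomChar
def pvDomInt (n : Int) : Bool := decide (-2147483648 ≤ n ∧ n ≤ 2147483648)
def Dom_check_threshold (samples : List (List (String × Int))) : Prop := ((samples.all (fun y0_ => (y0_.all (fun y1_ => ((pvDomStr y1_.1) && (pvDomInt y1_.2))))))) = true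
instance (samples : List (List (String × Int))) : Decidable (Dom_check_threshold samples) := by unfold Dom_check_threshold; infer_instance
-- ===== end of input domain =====

-- B replaces A's two counters and threshold checks by the size of the set of distinct label truth values (simpler, same O(n)).

-- ===== PORT A =====
-- truthiness of samples[i].get('clf'): missing key or 0 is falsy
def pvClf (s : List (String × Int)) : Bool :=
  match (PySem.Dict.mk s).get? "clf" with
  | some v => decide (v ≠ 0)
  | none => false

-- the for-loop over range(0, len(samples)): rest is the unprocessed suffix, pos/neg the counters
def pvGo (n : Int) (rest : List (List (String × Int))) (pos neg : Int) : Bool :=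
  match rest with
  | [] => false
  | s :: rs =>
    let pos' := if pvClf s then pos + 1 else pos
    let neg' := if pvClf s then neg else neg + 1
    if pos' ≥ n then true
    else if neg' ≥ n then true
    else pvGo n rs pos' neg'

def check_threshold (samples : List (List (String × Int))) : Bool :=
  let threshold : Int := 1
  pvGo (threshold * (samples.length : Int)) samples 0 0

-- ===== PORT B =====
def check_threshold_alt (samples : List (List (String × Int))) : Bool :=
  decide ((PySem.Set.ofList (samples.map pvClf)).length = 1)

-- ===== PRECONDITION & SPEC =====
def Spec_check_threshold (samples : List (List (String × Int))) (out : Bool) : Prop := out = check_threshold_alt samples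
instance (samples : List (List (String × Int))) (out : Bool) : Decidable (Spec_check_threshold samples out) := by unfold Spec_check_threshold; infer_instance

-- ===== CLAIM (what is proved, stated in full; the proofs are below) =====
def Claim_equal_check_threshold : Prop := ∀ (samples : List (List (String × Int))), Dom_check_threshold samples → Spec_check_threshold samples (check_threshold samples)

-- ===== LEMMAS AND PROOFS =====

theorem bool_count_len (bs : List Bool) : bs.count true + bs.count false = bs.length := by
  induction bs with
  | nil => simp
  | cons b rs ih => cases b <;> simp <;> omega

-- A's loop returns true iff, once every element is processed, a counter reaches n
theorem pvGo_spec (rest : List (List (String × Int))) :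
    ∀ (pos neg : Int), 0 ≤ pos → 0 ≤ neg →
    (pvGo (pos + neg + rest.length) rest pos neg = true ↔
      (rest ≠ [] ∧
        (pos + ((rest.map pvClf).count true : Int) = pos + neg + rest.length ∨
         neg + ((rest.map pvClf).count false : Int) = pos + neg + rest.length))) := by
  induction rest with
  | nil => simp [pvGo]
  | cons s rs ih =>
    intro pos neg hp hn
    have hc := bool_count_len (rs.map pvClf)
    have hct : (rs.map pvClf).count true ≤ rs.length := by
      simpa using List.count_le_length (l := rs.map pvClf) (a := true)
    have hcf : (rs.map pvClf).count false ≤ rs.length := by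
      simpa using List.count_le_length (l := rs.map pvClf) (a := false)
    simp only [List.length_map] at hc
    cases hb : pvClf s with
    | true =>
      simp only [pvGo, hb, if_true, List.map_cons, List.count_cons, List.length_cons,
        ne_eq, List.cons_ne_nil, not_false_eq_true, true_and, beq_iff_eq, reduceCtorEq,
        ite_false]
      split_ifs with h2 h3
      · simp only [true_iff]
        push_cast at h2 hct hcf hc ⊢
        omega
      · simp only [true_iff]
        push_cast at h2 h3 hct hcf hc ⊢
        omega
      · have harith : pos + neg + (((rs.length + 1 : Nat)) : Int) = (pos + 1) + neg + rs.length := by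
          push_cast; ring
        rw [harith, ih (pos + 1) neg (by omega) hn]
        simp only [ne_eq, ← List.length_eq_zero_iff]
        push_cast at h2 h3 hct hcf hc ⊢
        omega
    | false =>
      simp only [pvGo, hb, List.map_cons, List.count_cons, List.length_cons,
        ne_eq, List.cons_ne_nil, not_false_eq_true, true_and, beq_iff_eq, reduceCtorEq,
        ite_true, ite_false]
      split_ifs with h2 h3
      · simp only [true_iff]
        push_cast at h2 hct hcf hc ⊢
        omega
      · simp only [true_iff]
        push_cast at h2 h3 hct hcf hc ⊢
        omega
      · have harith : pos + neg + (((rs.length + 1 : Nat)) : Int) = pos + (neg + 1) + rs.length := by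
          push_cast; ring
        rw [harith, ih pos (neg + 1) hp (by omega)]
        simp only [ne_eq, ← List.length_eq_zero_iff]
        push_cast at h2 h3 hct hcf hc ⊢
        omega

-- a duplicate-free list of booleans has length (true ∈ s) + (false ∈ s)
theorem nodup_bool_len (s : List Bool) (h : s.Nodup) :
    s.length = (if true ∈ s then 1 else 0) + (if false ∈ s then 1 else 0) := by
  match s with
  | [] => simp
  | [a] => cases a <;> simp
  | [a, b] =>
    simp only [List.nodup_cons, List.mem_cons] at h
    cases a <;> cases b <;> simp at h ⊢
  | a :: b :: c :: t =>
    exfalso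
    simp only [List.nodup_cons, List.mem_cons] at h
    cases a <;> cases b <;> cases c <;> simp at h

-- the set of distinct booleans is a singleton iff the list is nonempty and constant
theorem setlen_one (bs : List Bool) :
    ((PySem.Set.ofList bs).length = 1) ↔
      (bs ≠ [] ∧ (bs.count true = bs.length ∨ bs.count false = bs.length)) := by
  have hl := nodup_bool_len _ (PySem.Set.nodup_ofList (xs := bs))
  rw [hl, if_congr (PySem.Set.mem_ofList bs true) rfl rfl,
    if_congr (PySem.Set.mem_ofList bs false) rfl rfl,
    List.count_eq_length, List.count_eq_length]
  constructor
  · intro h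
    by_cases h1 : true ∈ bs <;> by_cases h2 : false ∈ bs
    · exfalso; simp [h1, h2] at h
    · refine ⟨List.ne_nil_of_mem h1, Or.inl fun b hb => ?_⟩
      cases b
      · exact absurd hb h2
      · rfl
    · refine ⟨List.ne_nil_of_mem h2, Or.inr fun b hb => ?_⟩
      cases b
      · rfl
      · exact absurd hb h1
    · exfalso; simp [h1, h2] at h
  · rintro ⟨hne, h | h⟩
    · have h2 : false ∉ bs := fun hf => by simpa using h false hf
      have h1 : true ∈ bs := by
        rcases List.exists_mem_of_ne_nil bs hne with ⟨b, hb⟩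
        cases b
        · exact absurd hb h2
        · exact hb
      simp [h1, h2]
    · have h1 : true ∉ bs := fun hf => by simpa using h true hf
      have h2 : false ∈ bs := by
        rcases List.exists_mem_of_ne_nil bs hne with ⟨b, hb⟩
        cases b
        · exact hb
        · exact absurd hb h1
      simp [h1, h2]

-- ===== VERDICT (by name: the statement is the Claim_ definition above) =====
theorem check_threshold_spec : Claim_equal_check_threshold := by
  intro samples _
  unfold Spec_check_threshold
  have hA : check_threshold samples = true ↔
      (samples ≠ [] ∧
        (((samples.map pvClf).count true : Int) = samples.length ∨
         ((samples.map pvClf).count false : Int) = samples.length)) := by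
    show pvGo ((1 : Int) * (samples.length : Int)) samples 0 0 = true ↔ _
    rw [one_mul]
    have h := pvGo_spec samples 0 0 le_rfl le_rfl
    simpa using h
  have hB : check_threshold_alt samples = true ↔
      ((samples.map pvClf) ≠ [] ∧
        ((samples.map pvClf).count true = (samples.map pvClf).length ∨
         (samples.map pvClf).count false = (samples.map pvClf).length)) := by
    unfold check_threshold_alt
    rw [decide_eq_true_iff, setlen_one]
  have hiff : check_threshold samples = true ↔ check_threshold_alt samples = true := by
    rw [hA, hB]
    simp only [ne_eq, List.map_eq_nil_iff, List.length_map]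
    constructor
    · rintro ⟨hne, h | h⟩
      · exact ⟨hne, Or.inl (by omega)⟩
      · exact ⟨hne, Or.inr (by omega)⟩
    · rintro ⟨hne, h | h⟩
      · exact ⟨hne, Or.inl (by omega)⟩
      · exact ⟨hne, Or.inr (by omega)⟩
  cases hx : check_threshold samples <;> cases hy : check_threshold_alt samples <;> simp_all
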